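-- pv_equiv track=rewrite | github.com/anoopkunchukuttan/indic_nlp_library | indicnlp/syllable/syllabifier.py | denormalize_punjabi
-- ===== SOURCE A (Python) =====
-- def denormalize_punjabi(word, word_mask):
--
--     word=list(word)
--     word_mask=list(word_mask)
--
--     ## pattern 2
--     idx=0
--     while idx>=0:
--         try:
--             idx=word_mask.index('2',idx)
--             word[idx]='\u0a70'
--             word_mask[idx]='0'
--             start=idx
--         except ValueError as e:
--             break
--
--     ## pattern 3
--     idx=0
--     while idx>=0:
--         try:
--             idx=word_mask.index('3',idx)
--             word[idx:idx+3]='\u0a71{}'.format(word[idx])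
--             word_mask[idx:idx+3]='00'
--             start=idx
--         except ValueError as e:
--             break
--
--     return ''.join(word)
-- ===== SOURCE B (Python) =====
-- def denormalize_punjabi(word, word_mask):
--     pieces = []
--     i = 0
--     n = len(word)
--     while i < n:
--         c = word_mask[i] if i < len(word_mask) else ''
--         if c == '2':
--             pieces.append('\u0a70')
--             i += 1
--         elif c == '3':
--             pieces.append('\u0a71' + word[i])
--             i += 3
--         else:
--             pieces.append(word[i])
--             i += 1
--     return ''.join(pieces)
-- ===== Notes on version B (the rewrite author's own statement) =====
-- stated objective: simpler
-- what changed: Replaces the two repeated index-search-and-splice passes over mutable lists by a single forward accumulating pass over the word that emits each output piece once.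
-- outside the precondition, e.g. on denormalize_punjabi('a', '33'): A returns 'ੱa', B returns 'ੱa'; on denormalize_punjabi('ab', '003'): A raises IndexError, B returns 'ab'
import Mathlib
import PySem

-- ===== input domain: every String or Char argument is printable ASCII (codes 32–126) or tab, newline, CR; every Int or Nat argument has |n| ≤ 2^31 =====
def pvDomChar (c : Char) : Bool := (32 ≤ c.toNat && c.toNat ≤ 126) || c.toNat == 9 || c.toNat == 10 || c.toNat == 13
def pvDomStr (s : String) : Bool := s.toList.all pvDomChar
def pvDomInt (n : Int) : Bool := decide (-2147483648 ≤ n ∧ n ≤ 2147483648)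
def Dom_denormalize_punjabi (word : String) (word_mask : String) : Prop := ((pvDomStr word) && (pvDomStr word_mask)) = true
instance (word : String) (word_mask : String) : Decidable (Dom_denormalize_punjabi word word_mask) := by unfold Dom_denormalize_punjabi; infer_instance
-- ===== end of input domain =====

-- B rebuilds the word in one forward accumulating pass instead of A's two repeated
-- index-search-and-splice passes over mutable lists (different decomposition; same return value).


-- ===== PORT A =====
-- list.index(v, start): first occurrence of v at position ≥ start (exact for start ≤ length)
def pvIndexFrom (xs : List Char) (v : Char) (start : Nat) : Option Nat :=
  (PySem.List.index? (xs.drop start) v).map (· + start)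

-- pattern-2 while loop of A; `none` = Python raises IndexError (word[idx]= out of range).
-- fuel only makes the loop total; fuel = mask.length + 1 > count '2' is always enough.
def pvPass2 (fuel : Nat) (word mask : List Char) (idx : Nat) : Option (List Char × List Char) :=
  match fuel with
  | 0 => some (word, mask)
  | fuel + 1 =>
    match pvIndexFrom mask '2' idx with
    | none => some (word, mask)                      -- ValueError → break
    | some j =>
      if j < word.length then
        pvPass2 fuel (word.set j '\u0A70') (mask.set j '0') j
      else none                                     -- word[idx]= raises IndexError

-- pattern-3 while loop of A; slice assignment word[idx:idx+3] = ['\u0A71', word[idx]]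
def pvPass3 (fuel : Nat) (word mask : List Char) (idx : Nat) : Option (List Char) :=
  match fuel with
  | 0 => some word
  | fuel + 1 =>
    match pvIndexFrom mask '3' idx with
    | none => some word                              -- ValueError → break
    | some j =>
      match PySem.List.pyGet? word (Int.ofNat j) with
      | none => none                                 -- word[idx] raises IndexError
      | some wj =>
        pvPass3 fuel (word.take j ++ ['\u0A71', wj] ++ word.drop (j + 3))
                     (mask.take j ++ ['0', '0'] ++ mask.drop (j + 3)) j

def denormalize_punjabi (word : String) (word_mask : String) : String :=
  let w := word.toList
  let m := word_mask.toList
  match pvPass2 (m.length + 1) w m 0 with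
  | none => ""                                       -- Python raises IndexError (outside Pre_)
  | some (w1, m1) =>
    match pvPass3 (m1.length + 1) w1 m1 0 with
    | none => ""                                     -- Python raises IndexError (outside Pre_)
    | some w2 => String.ofList w2

-- ===== PORT B =====
-- single forward pass of Source B over the word: `mask[i]?` is "word_mask[i] if i < len(word_mask) else ''"
def pvBuild (word mask : List Char) (i : Nat) : List Char :=
  if h : i < word.length then
    let c := mask[i]?
    if c = some '2' then '\u0A70' :: pvBuild word mask (i + 1)
    else if c = some '3' then '\u0A71' :: word[i] :: pvBuild word mask (i + 3)
    else word[i] :: pvBuild word mask (i + 1)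
  else []
termination_by word.length - i

def denormalize_punjabi_alt (word : String) (word_mask : String) : String :=
  String.ofList (pvBuild word.toList word_mask.toList 0)

-- ===== PRECONDITION & SPEC =====
-- Pre_ excludes masks carrying a '2' or '3' beyond the end of the word: there the mask is not a
-- mask of this word and A in general raises IndexError (in the few skipped-'3'-overhang cases
-- where A still returns, B returns the same value anyway).
def Pre_denormalize_punjabi (word : String) (word_mask : String) : Prop :=
  '2' ∉ word_mask.toList.drop word.toList.length ∧ '3' ∉ word_mask.toList.drop word.toList.length
instance (word : String) (word_mask : String) : Decidable (Pre_denormalize_punjabi word word_mask) := by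
  unfold Pre_denormalize_punjabi; infer_instance

def pvWitness_denormalize_punjabi : String × String := ("abcde", "20300")

def Spec_denormalize_punjabi (word : String) (word_mask : String) (out : String) : Prop := out = denormalize_punjabi_alt word word_mask
instance (word : String) (word_mask : String) (out : String) : Decidable (Spec_denormalize_punjabi word word_mask out) := by unfold Spec_denormalize_punjabi; infer_instance

-- ===== CLAIM (what is proved, stated in full; the proofs are below) =====
def Claim_equal_denormalize_punjabi : Prop := ∀ (word : String) (word_mask : String), Dom_denormalize_punjabi word word_mask → Pre_denormalize_punjabi word word_mask → Spec_denormalize_punjabi word word_mask (denormalize_punjabi word word_mask)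

-- ===== LEMMAS AND PROOFS =====

-- pointwise effect of the pattern-2 pass on the word (the tail beyond the mask is untouched)
def pvZip2 (w m : List Char) : List Char :=
  List.zipWith (fun a b => if b = '2' then '\u0A70' else a) w m
def pvApply2 (w m : List Char) : List Char :=
  pvZip2 w m ++ w.drop m.length
def pvMap2 (m : List Char) : List Char :=
  m.map (fun b => if b = '2' then '0' else b)

-- effect of the pattern-3 pass (the word tail beyond the mask survives)
def pvSpec3 (w m : List Char) : List Char :=
  match w, m with
  | w, [] => w
  | [], _ :: _ => []
  | a :: w', c :: m' =>
    if c = '3' then '\u0A71' :: a :: pvSpec3 (w'.drop 2) (m'.drop 2)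
    else a :: pvSpec3 w' m'
termination_by m.length

-- combined effect = what B computes
def pvSpecB (w m : List Char) : List Char :=
  match w, m with
  | [], _ => []
  | a :: w', [] => a :: pvSpecB w' []
  | a :: w', c :: m' =>
    if c = '2' then '\u0A70' :: pvSpecB w' m'
    else if c = '3' then '\u0A71' :: a :: pvSpecB (w'.drop 2) (m'.drop 2)
    else a :: pvSpecB w' m'
termination_by w.length

theorem pvZip2_no2 (w m : List Char) (hm : '2' ∉ m) :
    pvZip2 w m = w.take m.length := by
  induction m generalizing w with
  | nil => simp [pvZip2]
  | cons c m' ih =>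
    cases w with
    | nil => simp [pvZip2]
    | cons a w' =>
      simp only [List.mem_cons, not_or] at hm
      simp only [pvZip2, List.zipWith, List.length_cons, List.take_succ_cons] at *
      rw [if_neg (Ne.symm hm.1), ih w' hm.2]

theorem pvApply2_no2 (w m : List Char) (hm : '2' ∉ m) : pvApply2 w m = w := by
  rw [pvApply2, pvZip2_no2 w m hm, List.take_append_drop]

theorem pvMap2_no2 (m : List Char) (hm : '2' ∉ m) : pvMap2 m = m := by
  induction m with
  | nil => rfl
  | cons c m' ih =>
    simp only [List.mem_cons, not_or] at hm
    simp [pvMap2, Ne.symm hm.1] at *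
    exact ih hm.2

theorem pvApply2_cons (a c : Char) (w' m' : List Char) :
    pvApply2 (a :: w') (c :: m') = (if c = '2' then '\u0A70' else a) :: pvApply2 w' m' := by
  simp [pvApply2, pvZip2, List.zipWith]

theorem pvApply2_length (w m : List Char) : (pvApply2 w m).length = w.length := by
  simp [pvApply2, pvZip2]
  omega

theorem pvApply2_tail (w m : List Char) :
    (pvApply2 w m).tail = pvApply2 w.tail m.tail := by
  cases w with
  | nil => simp [pvApply2, pvZip2]
  | cons a w' =>
    cases m with
    | nil => simp [pvApply2, pvZip2]
    | cons c m' => rw [pvApply2_cons]; rfl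

theorem pvApply2_drop2 (w m : List Char) :
    (pvApply2 w m).drop 2 = pvApply2 (w.drop 2) (m.drop 2) := by
  have h1 : ∀ (x y : List Char), (pvApply2 x y).drop 1 = pvApply2 (x.drop 1) (y.drop 1) := by
    intro x y
    simp only [List.drop_one]
    exact pvApply2_tail x y
  rw [show (2 : Nat) = 1 + 1 by rfl, ← List.drop_drop, h1, h1, List.drop_drop, List.drop_drop]

theorem pvZip2_split (pre suf w : List Char) (hp : '2' ∉ pre) (hlen : pre.length ≤ w.length) :
    pvZip2 w (pre ++ '2' :: suf) =
      w.take pre.length ++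
        (if _h : pre.length < w.length then '\u0A70' :: pvZip2 (w.drop (pre.length + 1)) suf else []) := by
  induction pre generalizing w with
  | nil =>
    cases w with
    | nil => simp [pvZip2]
    | cons a w' => simp [pvZip2]
  | cons c pre' ih =>
    cases w with
    | nil => simp at hlen
    | cons a w' =>
      simp only [List.mem_cons, not_or] at hp
      simp only [List.length_cons, List.cons_append, pvZip2, List.zipWith] at *
      rw [if_neg (Ne.symm hp.1)]
      rw [ih w' hp.2 (by omega)]
      simp

theorem pvNotMemDropMono {v : Char} (l : List Char) (a b : Nat) (hab : a ≤ b)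
    (h : v ∉ l.drop a) : v ∉ l.drop b := by
  intro hv
  apply h
  have : l.drop b = (l.drop a).drop (b - a) := by
    rw [List.drop_drop]
    congr 1
    omega
  rw [this] at hv
  exact List.drop_subset _ _ hv

theorem pvPass2_eq (fuel : Nat) (p q w m : List Char)
    (hpq : p.length = q.length) (hq : '2' ∉ q) (hfit : '2' ∉ m.drop w.length)
    (hfuel : m.count '2' < fuel) :
    pvPass2 fuel (p ++ w) (q ++ m) p.length = some (p ++ pvApply2 w m, q ++ pvMap2 m) := by
  induction fuel generalizing p q w m with
  | zero => omega
  | succ fuel ih =>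
    have hdrop : (q ++ m).drop p.length = m := by rw [hpq]; exact List.drop_left
    unfold pvPass2 pvIndexFrom
    rw [hdrop]
    match hidx : PySem.List.index? m '2' with
    | none =>
      have hm : '2' ∉ m := (PySem.List.index?_eq_none_iff _ _).1 hidx
      simp [pvApply2_no2 w m hm, pvMap2_no2 m hm]
    | some k =>
      obtain ⟨pre, suf, hm, hk, hpre⟩ := (PySem.List.index?_eq_some_iff _ _ _).1 hidx
      subst hm hk
      have hkw : pre.length < w.length := by
        by_contra hle
        apply hfit
        rw [List.drop_append, show w.length - pre.length = 0 by omega]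
        simp
      have hjlt : pre.length + p.length < (p ++ w).length := by simp; omega
      simp only [Option.map_some, hjlt, if_pos]
      have hset1 : (p ++ w).set (pre.length + p.length) '\u0A70' =
          (p ++ w.take pre.length) ++ '\u0A70' :: w.drop (pre.length + 1) := by
        rw [List.set_append, if_neg (by omega)]
        have : pre.length + p.length - p.length = pre.length := by omega
        rw [this, List.set_eq_take_append_cons_drop, if_pos hkw, List.append_assoc]
      have hset2 : (q ++ (pre ++ '2' :: suf)).set (pre.length + p.length) '0' =
          (q ++ pre) ++ '0' :: suf := by
        rw [List.set_append, if_neg (by omega)]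
        have h1 : pre.length + p.length - q.length = pre.length := by omega
        rw [h1, List.set_append, if_neg (by omega), Nat.sub_self]
        simp
      rw [hset1, hset2]
      have hplen : (p ++ w.take pre.length).length = pre.length + p.length := by
        simp; omega
      have hfit' : '2' ∉ ('0' :: suf).drop (('\u0A70' :: w.drop (pre.length + 1)).length) := by
        have he : ('0' :: suf).drop (('\u0A70' :: w.drop (pre.length + 1)).length) =
            suf.drop (w.length - pre.length - 1) := by
          simp only [List.length_cons, List.length_drop]
          rw [show w.length - (pre.length + 1) + 1 = (w.length - pre.length - 1) + 1 by omega]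
          rfl
        rw [he]
        have : (pre ++ '2' :: suf).drop w.length = suf.drop (w.length - pre.length - 1) := by
          rw [List.drop_append, List.drop_of_length_le (by omega), List.nil_append,
            show w.length - pre.length = (w.length - pre.length - 1) + 1 by omega]
          rfl
        rw [← this]
        exact hfit
      have := ih (p ++ w.take pre.length) (q ++ pre) ('\u0A70' :: w.drop (pre.length + 1)) ('0' :: suf)
        (by simp; omega) (by simp_all) hfit'
        (by simp_all [List.count_append]; omega)
      rw [← hplen, this]
      congr 1
      rw [Prod.mk.injEq]
      refine ⟨?_, ?_⟩
      · -- word component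
        conv_rhs => rw [pvApply2, pvZip2_split pre suf w hpre (by omega)]
        rw [dif_pos hkw, pvApply2_cons, if_neg (by decide), pvApply2]
        simp [List.drop_drop]
        congr 1
        omega
      · -- mask component
        have h0 := pvMap2_no2 pre hpre
        simp only [pvMap2] at h0 ⊢
        simp [h0]

theorem pvSpec3_no3 (w m : List Char) (hm : '3' ∉ m) : pvSpec3 w m = w := by
  induction m generalizing w with
  | nil => rw [pvSpec3]
  | cons c m' ih =>
    cases w with
    | nil => rw [pvSpec3]
    | cons a w' =>
      simp only [List.mem_cons, not_or] at hm
      rw [pvSpec3, if_neg (fun h => hm.1 h.symm), ih w' hm.2]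

theorem pvSpec3_prefix (wp p t s : List Char) (hlen : wp.length = p.length) (hp : '3' ∉ p) :
    pvSpec3 (wp ++ t) (p ++ s) = wp ++ pvSpec3 t s := by
  induction p generalizing wp with
  | nil => cases wp with
    | nil => simp
    | cons a w' => simp at hlen
  | cons c p' ih =>
    cases wp with
    | nil => simp at hlen
    | cons a wp' =>
      simp only [List.mem_cons, not_or] at hp
      simp only [List.cons_append, List.length_cons] at *
      rw [pvSpec3, if_neg (fun h => hp.1 h.symm), ih wp' (by omega) hp.2]

theorem pvPass3_eq (fuel : Nat) (p q w m : List Char)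
    (hpq : p.length = q.length) (hq : '3' ∉ q) (hfit : '3' ∉ m.drop w.length)
    (hfuel : m.count '3' < fuel) :
    pvPass3 fuel (p ++ w) (q ++ m) p.length = some (p ++ pvSpec3 w m) := by
  induction fuel generalizing p q w m with
  | zero => omega
  | succ fuel ih =>
    have hdrop : (q ++ m).drop p.length = m := by rw [hpq]; exact List.drop_left
    unfold pvPass3 pvIndexFrom
    rw [hdrop]
    match hidx : PySem.List.index? m '3' with
    | none =>
      have hm : '3' ∉ m := (PySem.List.index?_eq_none_iff _ _).1 hidx
      simp [pvSpec3_no3 w m hm]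
    | some k =>
      obtain ⟨pre, suf, hm, hk, hpre⟩ := (PySem.List.index?_eq_some_iff _ _ _).1 hidx
      subst hm hk
      have hkw : pre.length < w.length := by
        by_contra hle
        apply hfit
        rw [List.drop_append, show w.length - pre.length = 0 by omega]
        simp
      have hjlt : pre.length + p.length < (p ++ w).length := by simp; omega
      have hget : PySem.List.pyGet? (p ++ w) (Int.ofNat (pre.length + p.length)) =
          some w[pre.length] := by
        rw [show (Int.ofNat (pre.length + p.length)) = ((pre.length + p.length : Nat) : Int) from rfl,
          PySem.List.pyGet?_natCast, List.getElem?_eq_getElem hjlt,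
          List.getElem_append_right (by omega)]
        have h2 : pre.length + p.length - p.length = pre.length := by omega
        simp only [h2]
      simp only [Option.map_some]
      rw [hget]
      have htake1 : (p ++ w).take (pre.length + p.length) = p ++ w.take pre.length := by
        rw [List.take_append]
        rw [List.take_of_length_le (by omega)]
        congr 2
        omega
      have hdrop1 : (p ++ w).drop (pre.length + p.length + 3) = w.drop (pre.length + 3) := by
        rw [List.drop_append]
        rw [List.drop_of_length_le (by omega)]
        simp only [List.nil_append]
        congr 1
        omega
      have htake2 : (q ++ (pre ++ '3' :: suf)).take (pre.length + p.length) = q ++ pre := by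
        rw [List.take_append, List.take_of_length_le (by omega)]
        congr 1
        rw [List.take_append]
        rw [show pre.length + p.length - q.length - pre.length = 0 by omega]
        rw [List.take_of_length_le (by omega)]
        simp
      have hdrop2 : (q ++ (pre ++ '3' :: suf)).drop (pre.length + p.length + 3) = suf.drop 2 := by
        rw [List.drop_append, List.drop_of_length_le (by omega), List.drop_append,
          List.drop_of_length_le (by omega)]
        simp only [List.nil_append]
        rw [show pre.length + p.length + 3 - q.length - pre.length = 3 by omega]
        rfl
      rw [htake1, hdrop1, htake2, hdrop2]
      have hplen : (p ++ w.take pre.length).length = pre.length + p.length := by simp; omega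
      have hcount : List.count '3' ('0' :: '0' :: suf.drop 2) < fuel := by
        have h1 : List.count '3' (suf.drop 2) ≤ List.count '3' suf := by
          conv_rhs => rw [← List.take_append_drop 2 suf]
          rw [List.count_append]
          omega
        simp only [List.count_append, List.count_cons] at hfuel ⊢
        simp at hfuel ⊢
        omega
      have hfitsuf : '3' ∉ suf.drop (w.length - pre.length - 1) := by
        have : (pre ++ '3' :: suf).drop w.length = suf.drop (w.length - pre.length - 1) := by
          rw [List.drop_append, List.drop_of_length_le (by omega), List.nil_append,
            show w.length - pre.length = (w.length - pre.length - 1) + 1 by omega]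
          rfl
        rw [← this]
        exact hfit
      have hfit' : '3' ∉ ('0' :: '0' :: suf.drop 2).drop
          (('\u0A71' :: w[pre.length] :: w.drop (pre.length + 3)).length) := by
        have he : ('0' :: '0' :: suf.drop 2).drop
            (('\u0A71' :: w[pre.length] :: w.drop (pre.length + 3)).length) =
            suf.drop (2 + (w.length - (pre.length + 3))) := by
          simp only [List.length_cons, List.length_drop]
          rw [show w.length - (pre.length + 3) + 1 + 1 = 2 + (w.length - (pre.length + 3)) by omega]
          rw [show (2 : Nat) + (w.length - (pre.length + 3)) = (w.length - (pre.length + 3)) + 1 + 1 by omega]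
          rw [List.drop_succ_cons, List.drop_succ_cons, List.drop_drop]
          congr 1
          omega
        rw [he]
        exact pvNotMemDropMono suf (w.length - pre.length - 1) _ (by omega) hfitsuf
      have := ih (p ++ w.take pre.length) (q ++ pre) ('\u0A71' :: w[pre.length] :: w.drop (pre.length + 3))
        ('0' :: '0' :: suf.drop 2)
        (by simp; omega) (by simp_all) hfit' hcount
      show pvPass3 fuel (p ++ List.take pre.length w ++ ['\u0A71', w[pre.length]] ++ List.drop (pre.length + 3) w)
          (q ++ pre ++ ['0', '0'] ++ List.drop 2 suf) (pre.length + p.length) = _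
      rw [show p ++ List.take pre.length w ++ ['\u0A71', w[pre.length]] ++ List.drop (pre.length + 3) w
            = (p ++ List.take pre.length w) ++ ('\u0A71' :: w[pre.length] :: List.drop (pre.length + 3) w) by simp,
          show q ++ pre ++ ['0', '0'] ++ List.drop 2 suf = (q ++ pre) ++ ('0' :: '0' :: List.drop 2 suf) by simp,
          ← hplen, this]
      congr 1
      have hw : w = w.take pre.length ++ w[pre.length] :: w.drop (pre.length + 1) := by
        rw [← List.drop_eq_getElem_cons hkw, List.take_append_drop]
      conv_rhs => rw [hw]
      rw [pvSpec3_prefix _ pre _ _ (by simp; omega) hpre]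
      rw [pvSpec3, if_neg (by decide), pvSpec3, if_neg (by decide), pvSpec3, if_pos rfl]
      simp [List.drop_drop]

theorem pvBuild_aux (w m : List Char) (n : Nat) :
    ∀ i, w.length - i ≤ n → pvBuild w m i = pvSpecB (w.drop i) (m.drop i) := by
  induction n with
  | zero =>
    intro i hi
    rw [pvBuild, dif_neg (by omega)]
    rw [List.drop_of_length_le (by omega), pvSpecB]
  | succ n ihn =>
    intro i hi
    by_cases hlt : i < w.length
    · have hdw : w.drop i = w[i] :: w.drop (i + 1) := List.drop_eq_getElem_cons hlt
      rw [pvBuild, dif_pos hlt]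
      simp only []
      by_cases him : i < m.length
      · have hgm : m[i]? = some m[i] := List.getElem?_eq_getElem him
        have hdm : m.drop i = m[i] :: m.drop (i + 1) := List.drop_eq_getElem_cons him
        rw [hgm]
        by_cases h2 : m[i] = '2'
        · rw [if_pos (by rw [h2]), ihn (i + 1) (by omega)]
          rw [hdw, hdm, h2, pvSpecB, if_pos rfl]
        · rw [if_neg (by simp [h2])]
          by_cases h3 : m[i] = '3'
          · rw [if_pos (by rw [h3]), ihn (i + 3) (by omega)]
            rw [hdw, hdm, h3, pvSpecB, if_neg (by decide), if_pos rfl]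
            simp [List.drop_drop]
          · rw [if_neg (by simp [h3]), ihn (i + 1) (by omega)]
            rw [hdw, hdm, pvSpecB, if_neg h2, if_neg h3]
      · have hgm : m[i]? = none := List.getElem?_eq_none (by omega)
        have hdm : m.drop i = [] := List.drop_of_length_le (by omega)
        have hdm1 : m.drop (i + 1) = [] := List.drop_of_length_le (by omega)
        rw [hgm]
        rw [if_neg (by simp), if_neg (by simp), ihn (i + 1) (by omega)]
        rw [hdw, hdm, hdm1, pvSpecB]
    · rw [pvBuild, dif_neg hlt]
      rw [List.drop_of_length_le (by omega), pvSpecB]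

theorem pvSpecB_eq (w m : List Char) :
    pvSpecB w m = pvSpec3 (pvApply2 w m) (pvMap2 m) := by
  induction w, m using pvSpecB.induct with
  | case1 m =>
    rw [pvSpecB]
    have h1 : pvApply2 [] m = [] := by simp [pvApply2, pvZip2]
    rw [h1]
    cases hm : pvMap2 m with
    | nil => rw [pvSpec3]
    | cons c m' => rw [pvSpec3]
  | case2 a w' ih =>
    rw [pvSpecB, ih]
    have h1 : pvApply2 w' [] = w' := by simp [pvApply2, pvZip2]
    have h2 : pvApply2 (a :: w') [] = a :: w' := by simp [pvApply2, pvZip2]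
    rw [h1, h2, pvMap2]
    simp only [List.map_nil]
    rw [pvSpec3, pvSpec3]
  | case3 a w' m' ih =>
    rw [pvSpecB, if_pos rfl, pvApply2_cons, if_pos rfl]
    rw [show pvMap2 ('2' :: m') = '0' :: pvMap2 m' by simp [pvMap2]]
    rw [pvSpec3, if_neg (by decide), ih]
  | case4 a w' m' hne ih =>
    rw [pvSpecB, if_neg hne, if_pos rfl, pvApply2_cons, if_neg hne]
    rw [show pvMap2 ('3' :: m') = '3' :: pvMap2 m' by simp [pvMap2]]
    rw [pvSpec3, if_pos rfl, ih, pvApply2_drop2]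
    rw [show (pvMap2 m').drop 2 = pvMap2 (m'.drop 2) by simp [pvMap2, List.map_drop]]
  | case5 a w' c m' hne2 hne3 ih =>
    rw [pvSpecB, if_neg hne2, if_neg hne3, pvApply2_cons, if_neg hne2]
    rw [show pvMap2 (c :: m') = (if c = '2' then '0' else c) :: pvMap2 m' by simp [pvMap2],
      if_neg hne2]
    rw [pvSpec3, if_neg hne3, ih]

-- ===== VERDICT (by name: the statement is the Claim_ definition above) =====
theorem denormalize_punjabi_spec : Claim_equal_denormalize_punjabi := by
  intro word word_mask _ hpre
  obtain ⟨h2m, h3m⟩ := hpre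
  unfold Spec_denormalize_punjabi denormalize_punjabi denormalize_punjabi_alt
  have h2 := pvPass2_eq (word_mask.toList.length + 1) [] [] word.toList word_mask.toList
    rfl (by simp) h2m (Nat.lt_succ_of_le List.count_le_length)
  simp only [List.length_nil, List.nil_append] at h2
  have h3fit : '3' ∉ (pvMap2 word_mask.toList).drop (pvApply2 word.toList word_mask.toList).length := by
    rw [pvApply2_length]
    simp only [pvMap2, ← List.map_drop]
    intro hmem
    obtain ⟨b, hb, hfb⟩ := List.mem_map.1 hmem
    by_cases hb2 : b = '2'
    · rw [if_pos hb2] at hfb; exact absurd hfb (by decide)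
    · rw [if_neg hb2] at hfb; exact h3m (hfb ▸ hb)
  have h3 := pvPass3_eq ((pvMap2 word_mask.toList).length + 1) [] []
    (pvApply2 word.toList word_mask.toList) (pvMap2 word_mask.toList)
    rfl (by simp) h3fit (Nat.lt_succ_of_le List.count_le_length)
  simp only [List.length_nil, List.nil_append] at h3
  have hb := pvBuild_aux word.toList word_mask.toList word.toList.length 0 (by omega)
  simp only [List.drop_zero] at hb
  simp only [h2, h3, hb]
  rw [pvSpecB_eq word.toList word_mask.toList]
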